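-- pv_equiv track=rewrite | github.com/DJM-Miller/CMU-Stuff | AdvPy-djmiller/final project/Perket-2.4/Perket.py | Perket
-- ===== SOURCE A (Python) =====
-- from itertools import combinations
--
-- def Perket(ing_list):
--     #find all combinations
--     combo_set = set()
--     for i in range(len(ing_list)+1):
--         for subset in combinations(ing_list,i):
--             combo_set.add(subset)
--
--
--     smallest_diff = 1000000000
--     for combo in combo_set:
--         temp_bitter = 0
--         temp_sour = 1
--         for ing in combo:
--                 temp_sour *= ing[0]
--                 temp_bitter += ing[1]
--         if(smallest_diff > abs(temp_bitter - temp_sour)) and len(combo) > 0: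
--             smallest_diff = abs(temp_bitter-temp_sour)
--
--     return smallest_diff
-- ===== SOURCE B (Python) =====
-- def Perket(ing_list):
--     def go(items, p, q):
--         # minimum of |bitter_sum - sour_product| over all ways of adding a subset
--         # of `items` to a partial selection with running product p and sum q
--         if not items:
--             return abs(q - p)
--         (s, b), rest = items[0], items[1:]
--         return min(go(rest, p, q), go(rest, p * s, q + b))
--
--     # every nonempty subset is "element i plus a subset of the elements after i"
--     return min(go(ing_list[i + 1:], s, b) for i, (s, b) in enumerate(ing_list))
-- ===== Notes on version B (the rewrite author's own statement) =====
-- stated objective: alternative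
-- what changed: Replaced materializing every subset as a tuple in a set and re-scanning each subset with a binary DFS recursion that carries the running sour product and bitter sum incrementally and takes the minimum directly; Pre_ excludes the empty list, on which A returns only its initial sentinel 1000000000 while B's min() over nonempty subsets raises.
-- intended difference: On nonempty lists where every nonempty subset has |bitter_sum - sour_product| > 10^9, A returns its initial sentinel 1000000000 (its update guard never fires) while B returns the true minimum; B's value is the intended one since the task asks for the minimum difference itself. — e.g. on Perket([(2000000000, 0)]): A returns 1000000000, B returns 2000000000
-- outside the precondition, e.g. on Perket([]): A returns 1000000000, B raises ValueError
import Mathlib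
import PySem

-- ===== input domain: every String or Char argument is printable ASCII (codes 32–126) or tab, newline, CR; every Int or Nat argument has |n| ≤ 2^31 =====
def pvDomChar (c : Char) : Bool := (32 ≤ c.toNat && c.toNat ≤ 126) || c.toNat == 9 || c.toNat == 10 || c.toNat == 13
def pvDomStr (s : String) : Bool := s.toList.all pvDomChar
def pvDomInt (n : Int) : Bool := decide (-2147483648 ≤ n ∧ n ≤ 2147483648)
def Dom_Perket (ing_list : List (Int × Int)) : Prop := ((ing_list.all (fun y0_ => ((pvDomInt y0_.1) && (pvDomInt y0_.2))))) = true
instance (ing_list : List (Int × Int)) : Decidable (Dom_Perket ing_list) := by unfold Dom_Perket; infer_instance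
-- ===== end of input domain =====

-- B replaces A's materialized set of all subset tuples by a DFS recursion carrying the running
-- sour product and bitter sum; it raises on the empty list (excluded by Pre_) and returns the true
-- minimum where A's 10^9 sentinel masks it (stated as the intended difference D_). No mutation.

-- ===== PORT A =====
-- the set-building loops: for i in range(len+1): for subset in combinations(ing_list, i): combo_set.add(subset)
def pvComboSet (ing_list : List (Int × Int)) : PySem.Set (List (Int × Int)) :=
  (PySem.List.pyRange 0 ((ing_list.length : Int) + 1) 1).foldl
    (fun s i => (PySem.List.combinations ing_list i.toNat).foldl (fun s c => PySem.Set.add s c) s)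
    PySem.Set.empty

-- body of A's second loop (temp_bitter/temp_sour fold, then the guarded update)
def pvStepA (sd : Int) (combo : List (Int × Int)) : Int :=
  let bs := combo.foldl (fun (st : Int × Int) ing => (st.1 + ing.2, st.2 * ing.1)) ((0 : Int), (1 : Int))
  if sd > |bs.1 - bs.2| ∧ combo.length > 0 then |bs.1 - bs.2| else sd

def Perket (ing_list : List (Int × Int)) : Int :=
  (pvComboSet ing_list).foldl pvStepA 1000000000

-- ===== PORT B =====
-- go(items, p, q): min of |bitter_sum - sour_product| over all extensions by a subset of items
def pvGo : List (Int × Int) → Int → Int → Int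
  | [], p, q => |q - p|
  | (s, b) :: rest, p, q => min (pvGo rest p q) (pvGo rest (p * s) (q + b))

-- min(go(ing_list[i+1:], s, b) for i, (s, b) in enumerate(ing_list)); the enumerate index i is
-- ≥ 0, so the slice [i+1:] is List.drop (i.toNat + 1); min() of the empty generator raises
-- ValueError = none (outside Pre_), ported as the dummy 0
def Perket_alt (ing_list : List (Int × Int)) : Int :=
  match PySem.List.min?
      ((PySem.List.enumerate ing_list).map
        (fun x => pvGo (ing_list.drop (x.1.toNat + 1)) x.2.1 x.2.2)) (fun y => y) with
  | some m => m
  | none => 0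

-- bitter sum and sour product of a subset (used by D_ below)
def pvSumB (c : List (Int × Int)) : Int := c.foldr (fun x a => x.2 + a) 0
def pvProdS (c : List (Int × Int)) : Int := c.foldr (fun x a => x.1 * a) 1

-- ===== PRECONDITION & SPEC =====
-- Pre_ excludes only the empty list: there B's min() raises ValueError while A returns its
-- initial sentinel 1000000000, a value no nonempty subset produced.
def Pre_Perket (ing_list : List (Int × Int)) : Prop := ing_list ≠ []
instance (ing_list : List (Int × Int)) : Decidable (Pre_Perket ing_list) := by unfold Pre_Perket; infer_instance
def pvWitness_Perket : (List (Int × Int)) := [(1, 3), (2, 2)]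

-- On nonempty lists where every nonempty subset has |bitter_sum - sour_product| > 10^9, A returns
-- its initial sentinel 1000000000 (its update guard never fires) while B returns the true minimum;
-- B's value is the intended one since the task asks for the minimum difference itself.
def D_Perket (ing_list : List (Int × Int)) : Prop :=
  ing_list ≠ [] ∧ ∀ c ∈ ing_list.sublists, c ≠ [] → 1000000000 < |pvSumB c - pvProdS c|
instance (ing_list : List (Int × Int)) : Decidable (D_Perket ing_list) := by unfold D_Perket; infer_instance

def Spec_Perket (ing_list : List (Int × Int)) (out : Int) : Prop := ¬ D_Perket ing_list → out = Perket_alt ing_list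
instance (ing_list : List (Int × Int)) (out : Int) : Decidable (Spec_Perket ing_list out) := by unfold Spec_Perket; infer_instance

def pvDiffWitness_Perket : (List (Int × Int)) := [(2000000000, 0)]
def pvDiffWitnessOut_Perket : Int × Int := (1000000000, 2000000000)

-- ===== CLAIM (what is proved, stated in full; the proofs are below) =====
def Claim_unchanged_Perket : Prop := ∀ (ing_list : List (Int × Int)), Dom_Perket ing_list → Pre_Perket ing_list → Spec_Perket ing_list (Perket ing_list)
def Claim_changed_Perket : Prop := Dom_Perket (pvDiffWitness_Perket) ∧ Pre_Perket (pvDiffWitness_Perket) ∧ D_Perket (pvDiffWitness_Perket) ∧ Perket (pvDiffWitness_Perket) = pvDiffWitnessOut_Perket.1 ∧ Perket_alt (pvDiffWitness_Perket) = pvDiffWitnessOut_Perket.2 ∧ pvDiffWitnessOut_Perket.1 ≠ pvDiffWitnessOut_Perket.2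
def Claim_exact_Perket : Prop := ∀ (ing_list : List (Int × Int)), Dom_Perket ing_list → Pre_Perket ing_list → D_Perket ing_list → Perket ing_list ≠ Perket_alt ing_list

-- ===== LEMMAS AND PROOFS =====

-- the value |(q + Σ bitter) - p * Π sour| of a subset under a running product p and sum q
def pvF (p q : Int) (c : List (Int × Int)) : Int := |(q + pvSumB c) - p * pvProdS c|

theorem pvF_cons (p q s b : Int) (c : List (Int × Int)) :
    pvF p q ((s, b) :: c) = pvF (p * s) (q + b) c := by
  simp only [pvF, pvSumB, pvProdS, List.foldr_cons]
  ring_nf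

theorem pvF_nil (p q : Int) : pvF p q [] = |q - p| := by
  simp [pvF, pvSumB, pvProdS]

-- A's inner pair fold computes (bitter sum, sour product)
theorem pvPairFold (c : List (Int × Int)) : ∀ b0 s0 : Int,
    c.foldl (fun (st : Int × Int) ing => (st.1 + ing.2, st.2 * ing.1)) (b0, s0)
      = (b0 + pvSumB c, s0 * pvProdS c) := by
  induction c with
  | nil => intro b0 s0; simp [pvSumB, pvProdS]
  | cons x t ih =>
    intro b0 s0
    simp only [List.foldl_cons, ih, pvSumB, pvProdS, List.foldr_cons]
    simp only [Prod.mk.injEq]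
    constructor <;> ring

theorem pvStepA_eq (sd : Int) (c : List (Int × Int)) :
    pvStepA sd c = if sd > pvF 1 0 c ∧ c ≠ [] then pvF 1 0 c else sd := by
  have h := pvPairFold c 0 1
  simp only [pvStepA, h, pvF, zero_add, one_mul]
  rcases c with _ | ⟨x, t⟩ <;> simp

-- membership in A's combo set = being a sublist of the input
theorem pvMem_comboSet (l : List (Int × Int)) (c : List (Int × Int)) :
    c ∈ pvComboSet l ↔ c.Sublist l := by
  unfold pvComboSet
  have outer : ∀ (is : List Int) (s : PySem.Set (List (Int × Int))),
      c ∈ is.foldl (fun s i => (PySem.List.combinations l i.toNat).foldl (fun s c => PySem.Set.add s c) s) s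
        ↔ c ∈ s ∨ ∃ i ∈ is, c ∈ PySem.List.combinations l i.toNat := by
    intro is
    induction is with
    | nil => intro s; simp
    | cons i t ih =>
      intro s
      simp only [List.foldl_cons, ih]
      rw [show (fun (s : PySem.Set (List (Int × Int))) c => PySem.Set.add s c)
            = (fun s b => PySem.Set.add s (id b)) from rfl,
          PySem.Set.mem_foldl_add]
      simp only [id, List.mem_cons]
      constructor
      · rintro ((h | ⟨b, hb, rfl⟩) | h)
        · exact Or.inl h
        · exact Or.inr ⟨i, Or.inl rfl, hb⟩
        · rcases h with ⟨j, hj, hc⟩; exact Or.inr ⟨j, Or.inr hj, hc⟩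
      · rintro (h | ⟨j, (rfl | hj), hc⟩)
        · exact Or.inl (Or.inl h)
        · exact Or.inl (Or.inr ⟨c, hc, rfl⟩)
        · exact Or.inr ⟨j, hj, hc⟩
  rw [outer]
  constructor
  · rintro (h | ⟨i, _, hc⟩)
    · simp [PySem.Set.empty] at h
    · exact (PySem.List.mem_combinations_iff l i.toNat c).mp hc |>.1
  · intro h
    refine Or.inr ⟨(c.length : Int), ?_, ?_⟩
    · rw [PySem.List.mem_pyRange_one]
      have := h.length_le
      omega
    · rw [PySem.List.mem_combinations_iff]
      exact ⟨h, by simp⟩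

-- the three characterizing facts of A's min fold
theorem pvFoldA_le_init (cs : List (List (Int × Int))) : ∀ init : Int,
    cs.foldl pvStepA init ≤ init := by
  induction cs with
  | nil => intro init; simp
  | cons c t ih =>
    intro init
    have h1 := ih (pvStepA init c)
    have h2 : pvStepA init c ≤ init := by
      rw [pvStepA_eq]; split_ifs with h
      · omega
      · omega
    simp only [List.foldl_cons]
    omega

theorem pvFoldA_le_mem (cs : List (List (Int × Int))) : ∀ init : Int, ∀ c ∈ cs, c ≠ [] →
    cs.foldl pvStepA init ≤ pvF 1 0 c := by
  induction cs with
  | nil => intro _ c hc; simp at hc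
  | cons d t ih =>
    intro init c hc hne
    simp only [List.foldl_cons]
    rcases List.mem_cons.mp hc with rfl | hmem
    · have h1 := pvFoldA_le_init t (pvStepA init c)
      have h2 : pvStepA init c ≤ pvF 1 0 c := by
        rw [pvStepA_eq]; split_ifs with h
        · omega
        · rcases not_and_or.mp h with h | h
          · omega
          · exact absurd hne h
      omega
    · exact ih (pvStepA init d) c hmem hne

theorem pvFoldA_cases (cs : List (List (Int × Int))) : ∀ init : Int,
    cs.foldl pvStepA init = init ∨ ∃ c ∈ cs, c ≠ [] ∧ cs.foldl pvStepA init = pvF 1 0 c := by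
  induction cs with
  | nil => intro init; exact Or.inl rfl
  | cons d t ih =>
    intro init
    simp only [List.foldl_cons]
    rcases ih (pvStepA init d) with h | ⟨c, hc, hne, h⟩
    · rw [h, pvStepA_eq]
      split_ifs with hcond
      · exact Or.inr ⟨d, List.mem_cons_self, hcond.2, rfl⟩
      · exact Or.inl rfl
    · exact Or.inr ⟨c, List.mem_cons_of_mem d hc, hne, h⟩

-- B side: pvGo is the min of pvF over all sublists
theorem pvGo_le (l : List (Int × Int)) : ∀ p q : Int, ∀ c, c.Sublist l → pvGo l p q ≤ pvF p q c := by
  induction l with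
  | nil =>
    intro p q c hc
    rw [List.sublist_nil.mp hc, pvF_nil, pvGo]
  | cons x t ih =>
    rcases x with ⟨s, b⟩
    intro p q c hc
    rcases List.sublist_cons_iff.mp hc with h | ⟨r, rfl, hr⟩
    · calc pvGo ((s, b) :: t) p q ≤ pvGo t p q := min_le_left _ _
        _ ≤ pvF p q c := ih p q c h
    · calc pvGo ((s, b) :: t) p q ≤ pvGo t (p * s) (q + b) := min_le_right _ _
        _ ≤ pvF (p * s) (q + b) r := ih _ _ r hr
        _ = pvF p q ((s, b) :: r) := (pvF_cons p q s b r).symm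

theorem pvGo_attain (l : List (Int × Int)) : ∀ p q : Int, ∃ c, c.Sublist l ∧ pvGo l p q = pvF p q c := by
  induction l with
  | nil => intro p q; exact ⟨[], List.Sublist.refl _, by rw [pvF_nil, pvGo]⟩
  | cons x t ih =>
    rcases x with ⟨s, b⟩
    intro p q
    rcases min_choice (pvGo t p q) (pvGo t (p * s) (q + b)) with h | h
    · rcases ih p q with ⟨c, hc, he⟩
      exact ⟨c, hc.trans (List.sublist_cons_self _ _), by rw [pvGo, h, he]⟩
    · rcases ih (p * s) (q + b) with ⟨c, hc, he⟩
      exact ⟨(s, b) :: c, List.cons_sublist_cons.mpr hc, by rw [pvGo, h, he, pvF_cons]⟩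

-- the list of candidate values B takes the minimum of
def pvBList (l : List (Int × Int)) : List Int :=
  (PySem.List.enumerate l).map (fun x => pvGo (l.drop (x.1.toNat + 1)) x.2.1 x.2.2)

theorem pvBList_mem (l : List (Int × Int)) (v : Int) (hv : v ∈ pvBList l) :
    ∃ c, c.Sublist l ∧ c ≠ [] ∧ v = pvF 1 0 c := by
  rcases List.mem_map.mp hv with ⟨x, hx, rfl⟩
  rcases (PySem.List.mem_enumerate_iff _ _ _).mp hx with ⟨k, hk, rfl⟩
  simp only [Int.toNat_natCast, zero_add]
  rcases pvGo_attain (l.drop (k + 1)) l[k].1 l[k].2 with ⟨c, hc, he⟩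
  refine ⟨l[k] :: c, ?_, by simp, ?_⟩
  · have h1 : (l[k] :: c).Sublist (l[k] :: l.drop (k + 1)) := List.cons_sublist_cons.mpr hc
    have h2 : (l[k] :: l.drop (k + 1)) = l.drop k := List.getElem_cons_drop hk
    exact (h2 ▸ h1).trans (List.drop_sublist k l)
  · rw [he, show l[k] = (l[k].1, l[k].2) from rfl, pvF_cons, one_mul, zero_add]

theorem pvSublist_index (l : List (Int × Int)) : ∀ s b : Int, ∀ c : List (Int × Int),
    ((s, b) :: c).Sublist l → ∃ k : Nat, ∃ hk : k < l.length, l[k] = (s, b) ∧ c.Sublist (l.drop (k + 1)) := by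
  induction l with
  | nil => intro s b c h; exact absurd h (by simp)
  | cons y t ih =>
    intro s b c h
    cases h with
    | cons _ h3 =>
      rcases ih s b c h3 with ⟨k, hk, he, hc⟩
      exact ⟨k + 1, by simpa using hk, by simpa using he, by simpa using hc⟩
    | cons₂ _ h2 => exact ⟨0, by simp, rfl, by simpa using h2⟩

theorem pvBList_cover (l : List (Int × Int)) (c : List (Int × Int)) (hc : c.Sublist l) (hne : c ≠ []) :
    ∃ v ∈ pvBList l, v ≤ pvF 1 0 c := by
  rcases c with _ | ⟨⟨s, b⟩, c'⟩
  · exact absurd rfl hne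
  rcases pvSublist_index l s b c' hc with ⟨k, hk, he, hsub⟩
  refine ⟨pvGo (l.drop (k + 1)) s b, ?_, ?_⟩
  · refine List.mem_map.mpr ⟨((k : Int), l[k]), ?_, ?_⟩
    · exact (PySem.List.mem_enumerate_iff _ _ _).mpr ⟨k, hk, by simp⟩
    · rw [he]; simp
  · rw [pvF_cons, one_mul, zero_add]
    exact pvGo_le (l.drop (k + 1)) s b c' hsub

theorem pvBList_ne_nil (l : List (Int × Int)) (h : l ≠ []) : pvBList l ≠ [] := by
  rcases l with _ | ⟨x, t⟩
  · exact absurd rfl h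
  · simp [pvBList, PySem.List.enumerate_cons]

-- characterization of B's result on a nonempty list
theorem pvAlt_spec (l : List (Int × Int)) (h : l ≠ []) :
    Perket_alt l ∈ pvBList l ∧ ∀ v ∈ pvBList l, Perket_alt l ≤ v := by
  have hdef : Perket_alt l = (match PySem.List.min? (pvBList l) (fun y => y) with | some m => m | none => 0) := rfl
  rcases hm : PySem.List.min? (pvBList l) (fun y => y) with _ | m
  · exact absurd ((PySem.List.min?_eq_none_iff _ _).mp hm) (pvBList_ne_nil l h)
  · rw [hdef, hm]
    exact ⟨PySem.List.min?_mem hm, fun v hv => PySem.List.min?_isMin hm v hv⟩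

-- ===== VERDICT (by name: the statements are the Claim_ definitions above) =====
theorem Perket_spec : Claim_unchanged_Perket := by
  intro l _ hpre hnd
  -- ¬D_ on a nonempty list: some nonempty sublist has value ≤ 10^9
  have hex : ∃ c, c.Sublist l ∧ c ≠ [] ∧ |pvSumB c - pvProdS c| ≤ 1000000000 := by
    unfold D_Perket at hnd
    push Not at hnd
    rcases hnd hpre with ⟨c, hc, hne, hle⟩
    exact ⟨c, List.mem_sublists.mp hc, hne, hle⟩
  rcases hex with ⟨c0, hc0, hne0, hle0⟩
  have hF0 : pvF 1 0 c0 ≤ 1000000000 := by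
    simpa [pvF] using hle0
  rcases pvAlt_spec l hpre with ⟨hmem, hmin⟩
  -- B ≤ 10^9
  rcases pvBList_cover l c0 hc0 hne0 with ⟨v, hv, hvle⟩
  have hB_le : Perket_alt l ≤ 1000000000 := le_trans (hmin v hv) (le_trans hvle hF0)
  -- A ≤ B
  rcases pvBList_mem l _ hmem with ⟨c, hc, hne, he⟩
  have hA_le_B : Perket l ≤ Perket_alt l := by
    rw [he]
    exact pvFoldA_le_mem (pvComboSet l) 1000000000 c ((pvMem_comboSet l c).mpr hc) hne
  -- B ≤ A
  have hB_le_A : Perket_alt l ≤ Perket l := by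
    unfold Perket
    rcases pvFoldA_cases (pvComboSet l) 1000000000 with h | ⟨c, hcmem, hcne, h⟩
    · rw [h]; exact hB_le
    · rw [h]
      rcases pvBList_cover l c ((pvMem_comboSet l c).mp hcmem) hcne with ⟨v, hv, hvle⟩
      exact le_trans (hmin v hv) hvle
  omega

theorem Perket_changed : Claim_changed_Perket := by unfold Claim_changed_Perket; decide

theorem Perket_tight : Claim_exact_Perket := by
  intro l _ hpre hd
  have hall : ∀ c, c.Sublist l → c ≠ [] → 1000000000 < pvF 1 0 c := by
    intro c hc hne
    have := hd.2 c (List.mem_sublists.mpr hc) hne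
    simpa [pvF] using this
  -- A = 10^9
  have hA : Perket l = 1000000000 := by
    unfold Perket
    rcases pvFoldA_cases (pvComboSet l) 1000000000 with h | ⟨c, hcmem, hcne, h⟩
    · exact h
    · have h1 := pvFoldA_le_init (pvComboSet l) 1000000000
      have h2 := hall c ((pvMem_comboSet l c).mp hcmem) hcne
      unfold Perket at *
      omega
  -- B > 10^9
  rcases pvAlt_spec l hpre with ⟨hmem, _⟩
  rcases pvBList_mem l _ hmem with ⟨c, hc, hne, he⟩
  have := hall c hc hne
  omega
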